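-- pv_equiv track=rewrite | github.com/world-dv/Python_Programmers | 코딩 기초 트레이닝/Reading vertically.py | solution
-- ===== SOURCE A (Python) =====
-- def solution(my_string, m, c):
--     answer = ''
--     while(True) :
--         if c > len(my_string) :
--             break
--         answer += my_string[c - 1]
--         c += m
--     return answer
-- ===== SOURCE B (Python) =====
-- def solution(my_string, m, c):
--     return my_string[c - 1::m]
-- ===== Notes on version B (the rewrite author's own statement) =====
-- stated objective: idiomatic
-- what changed: The index-stepping while loop with a string accumulator is replaced by a single extended slice my_string[c-1::m].
-- outside the precondition, e.g. on solution('abc', 1, 0): A returns 'cabc', B returns 'c'; on solution('abc', -2, 5): A returns '', B returns 'ca'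
import Mathlib
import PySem

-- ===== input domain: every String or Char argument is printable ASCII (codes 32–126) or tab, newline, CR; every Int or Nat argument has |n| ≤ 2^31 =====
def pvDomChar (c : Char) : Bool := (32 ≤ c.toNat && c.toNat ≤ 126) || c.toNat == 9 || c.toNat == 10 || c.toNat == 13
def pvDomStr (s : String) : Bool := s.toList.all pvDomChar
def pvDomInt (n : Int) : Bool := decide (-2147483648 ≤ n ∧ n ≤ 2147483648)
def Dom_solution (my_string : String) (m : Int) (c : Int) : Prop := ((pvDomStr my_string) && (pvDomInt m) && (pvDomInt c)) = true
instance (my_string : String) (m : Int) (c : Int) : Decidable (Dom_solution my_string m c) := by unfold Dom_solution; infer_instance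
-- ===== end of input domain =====

-- B replaces A's index-stepping while loop (string-concatenation accumulator) by the single
-- extended slice my_string[c-1::m] (objective: idiomatic).

-- ===== PORT A =====
-- the while-True loop; fuel only makes the recursion total (for m ≥ 1 the loop runs at most
-- len + 1 iterations, so the fuel never runs out inside Pre_); `none` from pyGet? is IndexError
def solutionLoop (xs : List Char) (m : Int) : Nat → List Char → Int → List Char
  | 0, answer, _ => answer
  | fuel + 1, answer, c =>
    if c > (xs.length : Int) then answer
    else match PySem.List.pyGet? xs (c - 1) with
      | none => answer
      | some ch => solutionLoop xs m fuel (answer ++ [ch]) (c + m)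

def solution (my_string : String) (m : Int) (c : Int) : String :=
  String.ofList (solutionLoop my_string.toList m (my_string.toList.length + 1) [] c)

-- ===== PORT B =====
-- my_string[c-1::m]; slice? is none only for step m = 0 (Python's ValueError), outside Pre_
def solution_alt (my_string : String) (m : Int) (c : Int) : String :=
  (PySem.Str.slice? my_string (some (c - 1)) none m).getD ""

-- ===== PRECONDITION & SPEC =====
-- Pre_ restricts to the natural domain 1 ≤ m and 1 ≤ c of this 1-indexed stepping task:
-- for m ≤ 0 A diverges or raises IndexError except when c > len(s) (accidental immediate
-- exit returning ''), and for c ≤ 0 A's value comes from negative-index wraparound while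
-- B's comes from slice clamping — neither corner behaviour is specified.
def Pre_solution (my_string : String) (m : Int) (c : Int) : Prop := 1 ≤ m ∧ 1 ≤ c
instance (my_string : String) (m : Int) (c : Int) : Decidable (Pre_solution my_string m c) := by unfold Pre_solution; infer_instance
def pvWitness_solution : String × Int × Int := ("abcdef", 2, 1)

def Spec_solution (my_string : String) (m : Int) (c : Int) (out : String) : Prop := out = solution_alt my_string m c
instance (my_string : String) (m : Int) (c : Int) (out : String) : Decidable (Spec_solution my_string m c out) := by unfold Spec_solution; infer_instance

-- ===== CLAIM (what is proved, stated in full; the proofs are below) =====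
def Claim_equal_solution : Prop := ∀ (my_string : String) (m : Int) (c : Int), Dom_solution my_string m c → Pre_solution my_string m c → Spec_solution my_string m c (solution my_string m c)

-- ===== LEMMAS AND PROOFS =====

-- the number of characters still to be picked when A's cursor stands at c
def pvCnt (len m c : Int) : Nat := if c ≤ len then ((len - c + m) / m).toNat else 0

theorem pvCnt_pos (len m c : Int) (hm : 1 ≤ m) (hc : c ≤ len) : 1 ≤ pvCnt len m c := by
  unfold pvCnt
  rw [if_pos hc]
  have h1 : (1:Int) ≤ (len - c + m) / m := (Int.le_ediv_iff_mul_le (by omega)).mpr (by omega)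
  omega

theorem pvCnt_succ (len m c : Int) (hm : 1 ≤ m) (hc : c ≤ len) :
    pvCnt len m c = pvCnt len m (c + m) + 1 := by
  unfold pvCnt
  rw [if_pos hc]
  have key : (len - c + m) / m = (len - c) / m + 1 := by
    have := Int.add_mul_ediv_right (len - c) 1 (show m ≠ 0 by omega)
    simpa using this
  by_cases h2 : c + m ≤ len
  · rw [if_pos h2, key]
    have h3 : len - (c + m) + m = len - c := by ring
    rw [h3]
    have h4 : (0:Int) ≤ (len - c) / m := Int.ediv_nonneg (by omega) (by omega)
    omega
  · rw [if_neg h2, key]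
    have h5 : (len - c) / m = 0 := Int.ediv_eq_zero_of_lt (by omega) (by omega)
    omega

theorem pvCnt_le (len m c : Int) (hm : 1 ≤ m) (hc : 1 ≤ c) (hlen : 0 ≤ len) :
    (pvCnt len m c : Int) ≤ len + 1 := by
  unfold pvCnt
  split_ifs with h
  · have key : (len - c + m) / m = (len - c) / m + 1 := by
      have := Int.add_mul_ediv_right (len - c) 1 (show m ≠ 0 by omega)
      simpa using this
    have h4 : (len - c) / m ≤ len - c := Int.ediv_le_self _ (by omega)
    have h5 : (0:Int) ≤ (len - c) / m := Int.ediv_nonneg (by omega) (by omega)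
    omega
  · omega

theorem solutionLoop_eq (xs : List Char) (m : Int) (hm : 1 ≤ m) :
    ∀ (fuel : Nat) (c : Int), 1 ≤ c → pvCnt xs.length m c ≤ fuel → ∀ (ans : List Char),
      solutionLoop xs m fuel ans c =
        ans ++ (List.range (pvCnt (xs.length : Int) m c)).filterMap
          (fun (k : Nat) => xs[(c - 1 + m * (k : Int)).toNat]?) := by
  intro fuel
  induction fuel with
  | zero =>
    intro c hc hf ans
    by_cases h : c ≤ (xs.length : Int)
    · exact absurd hf (by have := pvCnt_pos xs.length m c hm h; omega)
    · have hz : pvCnt (xs.length : Int) m c = 0 := by unfold pvCnt; rw [if_neg h]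
      simp [solutionLoop, hz]
  | succ fuel ih =>
    intro c hc hf ans
    by_cases h : c ≤ (xs.length : Int)
    · have hget : PySem.List.pyGet? xs (c - 1) = xs[(c - 1).toNat]? :=
        PySem.List.pyGet?_of_nonneg _ (by omega)
      have hlt : (c - 1).toNat < xs.length := by omega
      have hsome : xs[(c - 1).toNat]? = some xs[(c - 1).toNat] := List.getElem?_eq_getElem hlt
      have hsucc := pvCnt_succ (xs.length : Int) m c hm h
      have step : solutionLoop xs m (fuel + 1) ans c =
          solutionLoop xs m fuel (ans ++ [xs[(c - 1).toNat]]) (c + m) := by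
        simp only [solutionLoop]
        rw [if_neg (by omega), hget, hsome]
      rw [step, ih (c + m) (by omega) (by omega), hsucc]
      rw [List.range_succ_eq_map, List.filterMap_cons, List.filterMap_map]
      have f0 : xs[(c - 1 + m * ((0:Nat) : Int)).toNat]? = some xs[(c - 1).toNat] := by
        simpa using hsome
      rw [f0]
      have fk : ((fun (k : Nat) => xs[(c - 1 + m * (k : Int)).toNat]?) ∘ Nat.succ) =
          (fun (k : Nat) => xs[(c + m - 1 + m * (k : Int)).toNat]?) := by
        funext k
        simp only [Function.comp]
        congr 2
        push_cast
        ring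
      rw [fk]
      simp
    · have hz : pvCnt (xs.length : Int) m c = 0 := by unfold pvCnt; rw [if_neg h]
      simp only [solutionLoop]
      rw [if_pos (by omega)]
      simp [hz]

theorem slice?_pos (xs : List Char) (a m : Int) (h0 : 0 ≤ a) (hm : 1 ≤ m) :
    PySem.List.slice? xs (some a) none m =
      some ((List.range (if min a (xs.length:Int) < (xs.length:Int) then (((xs.length:Int) - min a (xs.length:Int) + m - 1) / m).toNat else 0)).filterMap
        (fun (k : Nat) => xs[(min a (xs.length:Int) + m * (k : Int)).toNat]?)) := by
  simp only [PySem.List.slice?, PySem.List.sliceIndices]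
  rw [if_neg (by omega : ¬ m = 0)]
  simp only [if_neg (show ¬ a < 0 by omega), if_pos (show 0 < m by omega),
    if_neg (show ¬ m < 0 by omega)]

-- ===== VERDICT (by name: the statement is the Claim_ definition above) =====
theorem solution_spec : Claim_equal_solution := by
  intro s m c _ hpre
  obtain ⟨hm, hc⟩ := hpre
  unfold Spec_solution solution solution_alt
  rw [PySem.Str.slice?, PySem.Chars.slice?_eq_listSlice?,
    slice?_pos s.toList (c - 1) m (by omega) hm]
  simp only [Option.map_some, Option.getD_some]
  congr 1
  by_cases h : c ≤ (s.toList.length : Int)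
  · rw [min_eq_left (by omega)]
    rw [if_pos (by omega)]
    have harith : ((s.toList.length : Int) - (c - 1) + m - 1) = (s.toList.length : Int) - c + m := by ring
    rw [harith]
    have hcnt : ((((s.toList.length : Int) - c + m) / m).toNat) = pvCnt (s.toList.length : Int) m c := by
      unfold pvCnt; rw [if_pos h]
    rw [hcnt]
    have hle := pvCnt_le (s.toList.length : Int) m c hm hc (by omega)
    have := solutionLoop_eq s.toList m hm (s.toList.length + 1) c hc (by omega) []
    rw [this]
    simp only [List.nil_append]
  · rw [min_eq_right (by omega)]
    rw [if_neg (by omega)]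
    simp only [List.range_zero, List.filterMap_nil]
    have hz : pvCnt (s.toList.length : Int) m c = 0 := by unfold pvCnt; rw [if_neg h]
    have := solutionLoop_eq s.toList m hm (s.toList.length + 1) c hc (by omega) []
    rw [this, hz]
    simp
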